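-- pv_equiv track=rewrite | github.com/kdg2957/erica_computer | 1학년 1학기/프로그래밍기초/4.15 프로그래밍기초 실습/4-31.py | fastmult
-- ===== SOURCE A (Python) =====
-- def fastmult(m,n):
--     ans = 0
--     while n > 0:
--         if n % 2 ==0:
--             m,n = m+m, n //2
--         else:
--             n, ans = n -1 , ans+m
--
--
--     return ans
-- ===== SOURCE B (Python) =====
-- def fastmult(m, n):
--     return m * n if n > 0 else 0
-- ===== Notes on version B (the rewrite author's own statement) =====
-- stated objective: simpler
-- what changed: Replaced the doubling/halving loop by the closed form m*n (0 for n <= 0), which the loop provably computes.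
import Mathlib
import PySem

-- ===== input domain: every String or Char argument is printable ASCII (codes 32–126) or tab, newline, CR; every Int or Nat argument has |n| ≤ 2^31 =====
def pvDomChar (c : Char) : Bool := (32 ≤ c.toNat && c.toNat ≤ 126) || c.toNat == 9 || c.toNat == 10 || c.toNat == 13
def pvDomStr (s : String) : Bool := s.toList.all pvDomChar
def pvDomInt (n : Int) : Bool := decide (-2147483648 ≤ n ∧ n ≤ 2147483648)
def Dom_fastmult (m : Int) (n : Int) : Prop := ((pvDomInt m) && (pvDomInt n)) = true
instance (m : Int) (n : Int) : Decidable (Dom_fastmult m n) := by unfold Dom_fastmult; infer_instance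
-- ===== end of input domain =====

-- B replaces A's doubling/halving loop by the closed form m*n (0 for n <= 0), which the loop computes.

-- ===== PORT A =====
-- the while loop of A, state (m, n, ans)
def fastmultGo (m : Int) (n : Int) (ans : Int) : Int :=
  if _h : n > 0 then
    if PySem.Int.mod n 2 = 0 then
      fastmultGo (m + m) (PySem.Int.floordiv n 2) ans
    else
      fastmultGo m (n - 1) (ans + m)
  else ans
termination_by n.toNat
decreasing_by
· rw [PySem.Int.floordiv_eq_ediv_of_pos (by omega : (0:Int) < 2)]; omega
· omega

def fastmult (m : Int) (n : Int) : Int := fastmultGo m n 0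

-- ===== PORT B =====
def fastmult_alt (m : Int) (n : Int) : Int := if n > 0 then m * n else 0

-- ===== PRECONDITION & SPEC =====
def Spec_fastmult (m : Int) (n : Int) (out : Int) : Prop := out = fastmult_alt m n
instance (m : Int) (n : Int) (out : Int) : Decidable (Spec_fastmult m n out) := by unfold Spec_fastmult; infer_instance

-- ===== CLAIM (what is proved, stated in full; the proofs are below) =====
def Claim_equal_fastmult : Prop := ∀ (m : Int) (n : Int), Dom_fastmult m n → Spec_fastmult m n (fastmult m n)

-- ===== LEMMAS AND PROOFS =====
-- loop invariant: the loop returns ans + m * max n 0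
theorem fastmultGo_eq (k : Nat) : ∀ (m n ans : Int), n.toNat ≤ k →
    fastmultGo m n ans = ans + (if n > 0 then m * n else 0) := by
  induction k with
  | zero =>
    intro m n ans h
    rw [fastmultGo, dif_neg (by omega : ¬ n > 0), if_neg (by omega : ¬ n > 0)]
    omega
  | succ k ih =>
    intro m n ans h
    rw [fastmultGo]
    by_cases hp : n > 0
    · rw [dif_pos hp, if_pos hp]
      have hfd : PySem.Int.floordiv n 2 = n / 2 :=
        PySem.Int.floordiv_eq_ediv_of_pos (by omega)
      have hm : PySem.Int.mod n 2 = n % 2 :=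
        PySem.Int.mod_eq_emod_of_pos (by omega)
      by_cases he : PySem.Int.mod n 2 = 0
      · rw [if_pos he, ih (m + m) _ ans (by rw [hfd]; omega)]
        have he' : n % 2 = 0 := by rw [← hm]; exact he
        have h2 : n / 2 * 2 = n := Int.ediv_mul_cancel (Int.dvd_of_emod_eq_zero he')
        rw [hfd, if_pos (by omega : n / 2 > 0)]
        rw [show (m + m) * (n / 2) = m * (n / 2 * 2) by ring, h2]
      · rw [if_neg he, ih m (n - 1) (ans + m) (by omega)]
        by_cases h1 : n - 1 > 0
        · rw [if_pos h1]; ring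
        · have : n = 1 := by omega
          rw [if_neg h1, this]; ring
    · rw [dif_neg hp, if_neg hp]
      omega

-- ===== VERDICT (by name: the statement is the Claim_ definition above) =====
theorem fastmult_spec : Claim_equal_fastmult := by
  intro m n _
  unfold Spec_fastmult fastmult fastmult_alt
  simpa using fastmultGo_eq n.toNat m n 0 le_rfl
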